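-- pv_equiv track=rewrite | github.com/GraphicDThanh/training-hub | backend/python/python/think-python-2/13-pr2-data-structure/exercise-3.py | split_word_by_escape
-- ===== SOURCE A (Python) =====
-- from string import punctuation, whitespace
--
-- def split_word_by_escape(word):
--     """split word by escape to list word
--
--         word: string
--     Return: list of words
--     """
--     escape_string = punctuation + '——’’0123456789'
--     is_not_exist_escape = True
--
--     word = word.lower()
--
--     for char in escape_string:
--         if char in word:
--             is_not_exist_escape = False
--             for word in word.split(char):
--                 return split_word_by_escape(word)
--
--     if is_not_exist_escape:
--         return word
-- ===== SOURCE B (Python) =====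
-- from string import punctuation
--
-- def split_word_by_escape(word):
--     """Single left-to-right scan: return the lowered prefix before the first
--     escape character (the whole lowered word if there is none)."""
--     escapes = set(punctuation + '——’’0123456789')
--     out = []
--     for ch in word.lower():
--         if ch in escapes:
--             break
--         out.append(ch)
--     return ''.join(out)
-- ===== Notes on version B (the rewrite author's own statement) =====
-- stated objective: simpler
-- what changed: A's recursion over repeated split() calls (re-scanning the whole escape string and the word at every level) is replaced by one left-to-right scan of the lowered word that stops at the first escape character.
import Mathlib
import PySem

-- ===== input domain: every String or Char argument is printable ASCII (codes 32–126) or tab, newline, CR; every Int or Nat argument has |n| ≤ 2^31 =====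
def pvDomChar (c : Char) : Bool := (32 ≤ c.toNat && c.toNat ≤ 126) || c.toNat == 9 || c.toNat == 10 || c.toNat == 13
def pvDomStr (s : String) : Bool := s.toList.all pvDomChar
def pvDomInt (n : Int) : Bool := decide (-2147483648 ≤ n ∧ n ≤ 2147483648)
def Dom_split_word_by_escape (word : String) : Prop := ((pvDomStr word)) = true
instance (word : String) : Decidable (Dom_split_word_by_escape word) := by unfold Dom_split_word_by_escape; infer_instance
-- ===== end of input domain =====

-- B replaces A's recursion over repeated split() calls by a single left-to-right scan
-- that keeps the lowered prefix before the first escape character (objective: simpler).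

-- ===== PORT A =====

-- string.punctuation ++ '——’’0123456789', the escape_string of A (shared constant)
def pvEscChars : List Char := "!\"#$%&'()*+,-./:;<=>?@[\\]^_`{|}~——’’0123456789".toList

-- first element of Python's `word.split(char)` for a one-character separator:
-- exactly the characters before the first occurrence of c (exact; A's inner
-- `for word in word.split(char): return …` only ever uses this first piece)
def pvSplitFirst (c : Char) : List Char → List Char
  | [] => []
  | x :: xs => if x == c then [] else x :: pvSplitFirst c xs

-- termination of A's recursion: splitting at a character that occurs shortens the word
theorem pvSplitFirst_length_lt (c : Char) (l : List Char) (h : c ∈ l) :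
    (pvSplitFirst c l).length < l.length := by
  induction l with
  | nil => cases h
  | cons x xs ih =>
    by_cases hx : x = c
    · simp [pvSplitFirst, hx]
    · have hc : c ∈ xs := by
        rcases List.mem_cons.mp h with h' | h'
        · exact absurd h'.symm hx
        · exact h'
      have := ih hc
      simp [pvSplitFirst, hx]
      omega

def split_word_by_escape_core (w : List Char) : List Char :=
  let lw := PySem.Chars.lower w
  match hf : pvEscChars.find? (fun ch => lw.contains ch) with
  | some ch => split_word_by_escape_core (pvSplitFirst ch lw)
  | none => lw
termination_by w.length
decreasing_by
  have hmem : ch ∈ lw := by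
    have := List.find?_some hf
    simp at this
    exact this
  calc (pvSplitFirst ch lw).length < lw.length := pvSplitFirst_length_lt ch lw hmem
    _ = w.length := by
      show (PySem.Chars.lower w).length = w.length
      simp [PySem.Chars.lower]

def split_word_by_escape (word : String) : String :=
  String.ofList (split_word_by_escape_core word.toList)

-- ===== PORT B =====

-- the loop of Source B: accumulate characters until the first escape character
def pvTakeUntil (esc : PySem.Set Char) : List Char → List Char
  | [] => []
  | x :: xs => if esc.contains x then [] else x :: pvTakeUntil esc xs

def split_word_by_escape_alt (word : String) : String :=
  let escapes : PySem.Set Char := PySem.Set.ofList pvEscChars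
  String.ofList (pvTakeUntil escapes (PySem.Chars.lower word.toList))

-- ===== PRECONDITION & SPEC =====
def Spec_split_word_by_escape (word : String) (out : String) : Prop := out = split_word_by_escape_alt word
instance (word : String) (out : String) : Decidable (Spec_split_word_by_escape word out) := by unfold Spec_split_word_by_escape; infer_instance

-- ===== CLAIM (what is proved, stated in full; the proofs are below) =====
def Claim_equal_split_word_by_escape : Prop := ∀ (word : String), Dom_split_word_by_escape word → Spec_split_word_by_escape word (split_word_by_escape word)

-- ===== LEMMAS AND PROOFS =====

theorem pvCharLe_iff (a b : Char) : a ≤ b ↔ a.toNat ≤ b.toNat := ge_iff_le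

theorem pvLowerChar_idem (c : Char) :
    PySem.Chars.lowerChar (PySem.Chars.lowerChar c) = PySem.Chars.lowerChar c := by
  simp only [PySem.Chars.lowerChar, PySem.Chars.isupper]
  have hA : 'A'.toNat = 65 := by decide
  have hZ : 'Z'.toNat = 90 := by decide
  by_cases h : 'A' ≤ c ∧ c ≤ 'Z'
  · have h65 : (65:Nat) ≤ c.toNat := by have := (pvCharLe_iff 'A' c).mp h.1; omega
    have h90 : c.toNat ≤ 90 := by have := (pvCharLe_iff c 'Z').mp h.2; omega
    have hv : (c.toNat + 32).isValidChar := Or.inl (by omega)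
    have htn : (Char.ofNat (c.toNat + 32)).toNat = c.toNat + 32 := by
      rw [Char.toNat_ofNat, if_pos hv]
    have hcond : (decide ('A' ≤ c) && decide (c ≤ 'Z')) = true := by
      simp [h.1, h.2]
    have hcond2 : (decide ('A' ≤ Char.ofNat (c.toNat + 32)) && decide (Char.ofNat (c.toNat + 32) ≤ 'Z')) = false := by
      have : ¬ (Char.ofNat (c.toNat + 32) ≤ 'Z') := by
        rw [pvCharLe_iff, htn]; omega
      simp [this]
    simp only [hcond, if_pos, hcond2, Bool.false_eq_true, reduceIte]
  · have hcond : (decide ('A' ≤ c) && decide (c ≤ 'Z')) = false := by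
      rcases Decidable.not_and_iff_not_or_not.mp h with h' | h' <;> simp [h']
    simp only [hcond, Bool.false_eq_true, reduceIte]

theorem pvLower_fix (l : List Char) (h : ∀ x ∈ l, PySem.Chars.lowerChar x = x) :
    PySem.Chars.lower l = l := by
  simp only [PySem.Chars.lower]
  exact (List.map_congr_left h).trans (List.map_id _)

theorem pvLower_lower_mem (w : List Char) (x : Char) (hx : x ∈ PySem.Chars.lower w) :
    PySem.Chars.lowerChar x = x := by
  simp only [PySem.Chars.lower, List.mem_map] at hx
  obtain ⟨y, _, rfl⟩ := hx
  exact pvLowerChar_idem y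

theorem pvSplitFirst_subset (c : Char) (l : List Char) (x : Char)
    (hx : x ∈ pvSplitFirst c l) : x ∈ l := by
  induction l with
  | nil => simpa [pvSplitFirst] using hx
  | cons y ys ih =>
    by_cases hy : y = c
    · simp [pvSplitFirst, hy] at hx
    · simp only [pvSplitFirst, beq_iff_eq, hy, if_neg, not_false_eq_true,
        List.mem_cons] at hx
      rcases hx with h | h
      · simp [h]
      · exact List.mem_cons_of_mem _ (ih h)

theorem pvTakeUntil_splitFirst (c : Char) (hc : c ∈ pvEscChars) (l : List Char) :
    pvTakeUntil (PySem.Set.ofList pvEscChars) (pvSplitFirst c l)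
      = pvTakeUntil (PySem.Set.ofList pvEscChars) l := by
  induction l with
  | nil => rfl
  | cons x xs ih =>
    by_cases hx : x = c
    · subst hx
      simp [pvSplitFirst, pvTakeUntil, hc]
    · by_cases he : x ∈ pvEscChars
      · simp [pvSplitFirst, pvTakeUntil, hx, he]
      · simp [pvSplitFirst, pvTakeUntil, hx, he, ih]

theorem pvTakeUntil_of_no_esc (l : List Char)
    (h : ∀ x ∈ l, x ∉ pvEscChars) :
    pvTakeUntil (PySem.Set.ofList pvEscChars) l = l := by
  induction l with
  | nil => rfl
  | cons x xs ih =>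
    have hx : x ∉ pvEscChars := h x (List.mem_cons_self ..)
    simp [pvTakeUntil, hx, ih fun x hx' => h x (List.mem_cons_of_mem _ hx')]

theorem pvCore_eq (w : List Char) :
    split_word_by_escape_core w
      = pvTakeUntil (PySem.Set.ofList pvEscChars) (PySem.Chars.lower w) := by
  fun_induction split_word_by_escape_core w with
  | case1 w lw ch hf ih =>
    have hchEsc : ch ∈ pvEscChars := List.mem_of_find?_eq_some hf
    have hfix : PySem.Chars.lower (pvSplitFirst ch lw) = pvSplitFirst ch lw := by
      apply pvLower_fix
      intro x hx
      exact pvLower_lower_mem w x (pvSplitFirst_subset ch lw x hx)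
    rw [ih, hfix, pvTakeUntil_splitFirst ch hchEsc]
  | case2 w lw hf =>
    apply (pvTakeUntil_of_no_esc lw _).symm
    intro x hx hmem
    have := List.find?_eq_none.mp hf x hmem
    simp at this
    exact this hx

-- ===== VERDICT (by name: the statement is the Claim_ definition above) =====
theorem split_word_by_escape_spec : Claim_equal_split_word_by_escape := by
  intro word _
  unfold Spec_split_word_by_escape split_word_by_escape split_word_by_escape_alt
  rw [pvCore_eq]
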